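-- pv_equiv track=rewrite | github.com/TieferDenker/ProjOilerCodes | Proj_Euler_35.py | Solve_Prob
-- ===== SOURCE A (Python) =====
-- CircPri = [2, 3, 5, 7, 11, 13, 17, 31, 37, 71, 73, 79, 97, 113, 131, 197, 199, 311, 337, 373, 719, 733, 919, 971, 991, 1193, 1931, 3119, 3779, 7793, 7937, 9311, 9377, 11939, 19391, 19937, 37199, 39119, 71993, 91193, 93719, 93911, 99371, 193939, 199933, 319993, 331999, 391939, 393919, 919393, 933199, 939193, 939391, 993319, 999331]
--
-- def Solve_Prob(n):
--     summ = 0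
--     for i in range(0,len(CircPri)):
--         if CircPri[i] < n:
--             summ = summ + CircPri[i]
--         else:
--             break
--     answer = summ
--     return answer
-- ===== SOURCE B (Python) =====
-- CircPri = [2, 3, 5, 7, 11, 13, 17, 31, 37, 71, 73, 79, 97, 113, 131, 197, 199, 311, 337, 373, 719, 733, 919, 971, 991, 1193, 1931, 3119, 3779, 7793, 7937, 9311, 9377, 11939, 19391, 19937, 37199, 39119, 71993, 91193, 93719, 93911, 99371, 193939, 199933, 319993, 331999, 391939, 393919, 919393, 933199, 939193, 939391, 993319, 999331]
--
-- def Solve_Prob(n):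
--     # CircPri is sorted ascending: binary-search the boundary index, then sum the prefix.
--     lo, hi = 0, len(CircPri)
--     while lo < hi:
--         mid = (lo + hi) // 2
--         if CircPri[mid] < n:
--             lo = mid + 1
--         else:
--             hi = mid
--     return sum(CircPri[:lo])
-- ===== Notes on version B (the rewrite author's own statement) =====
-- stated objective: alternative
-- what changed: Replaces the linear scan-with-break over the sorted list by a hand-rolled bisect_left binary search for the boundary index followed by a prefix sum.
import Mathlib
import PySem

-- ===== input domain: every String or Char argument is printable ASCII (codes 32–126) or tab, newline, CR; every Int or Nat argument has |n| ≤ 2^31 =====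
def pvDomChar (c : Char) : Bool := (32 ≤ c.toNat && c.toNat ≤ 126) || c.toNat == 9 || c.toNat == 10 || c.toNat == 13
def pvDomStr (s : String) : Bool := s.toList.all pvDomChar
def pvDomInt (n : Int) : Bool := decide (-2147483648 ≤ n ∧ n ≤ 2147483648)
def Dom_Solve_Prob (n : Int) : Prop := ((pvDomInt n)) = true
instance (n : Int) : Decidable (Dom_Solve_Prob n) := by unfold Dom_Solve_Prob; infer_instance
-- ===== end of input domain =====

-- B replaces A's linear scan-with-break by a bisect_left binary search plus a prefix sum (alternative decomposition, same result).

def circPri : List Int := [2, 3, 5, 7, 11, 13, 17, 31, 37, 71, 73, 79, 97, 113, 131, 197, 199, 311, 337, 373, 719, 733, 919, 971, 991, 1193, 1931, 3119, 3779, 7793, 7937, 9311, 9377, 11939, 19391, 19937, 37199, 39119, 71993, 91193, 93719, 93911, 99371, 193939, 199933, 319993, 331999, 391939, 393919, 919393, 933199, 939193, 939391, 993319, 999331]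

-- ===== PORT A =====
-- A's for-loop over the indices of CircPri with break: structural recursion over the list carrying summ.
def sumLoopA (n : Int) : List Int → Int → Int
  | [], summ => summ
  | x :: xs, summ => if x < n then sumLoopA n xs (summ + x) else summ

def Solve_Prob (n : Int) : Int := sumLoopA n circPri 0

-- ===== PORT B =====
-- B's while-loop binary search (bisect_left); terminates since hi - lo shrinks.
def bisectLeft (n : Int) (lo hi : Nat) : Nat :=
  if _h : lo < hi then
    let mid := (lo + hi) / 2
    if circPri.getD mid 0 < n then bisectLeft n (mid + 1) hi else bisectLeft n lo mid
  else lo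
termination_by hi - lo
decreasing_by all_goals omega

def Solve_Prob_alt (n : Int) : Int := (circPri.take (bisectLeft n 0 circPri.length)).sum

-- ===== PRECONDITION & SPEC =====
def Spec_Solve_Prob (n : Int) (out : Int) : Prop := out = Solve_Prob_alt n
instance (n : Int) (out : Int) : Decidable (Spec_Solve_Prob n out) := by unfold Spec_Solve_Prob; infer_instance

-- ===== CLAIM (what is proved, stated in full; the proofs are below) =====
def Claim_equal_Solve_Prob : Prop := ∀ (n : Int), Dom_Solve_Prob n → Spec_Solve_Prob n (Solve_Prob n)

-- ===== LEMMAS AND PROOFS =====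

-- A's loop sums the longest prefix of elements < n.
theorem sumLoopA_eq (n : Int) (l : List Int) (s : Int) :
    sumLoopA n l s = s + (l.takeWhile (fun x => decide (x < n))).sum := by
  induction l generalizing s with
  | nil => simp [sumLoopA]
  | cons x xs ih =>
    by_cases h : x < n
    · simp [sumLoopA, h, ih]; ring
    · simp [sumLoopA, h]

-- taking the takeWhile-length prefix recovers the takeWhile prefix
theorem take_length_takeWhile {α : Type} (p : α → Bool) (l : List α) :
    l.take (l.takeWhile p).length = l.takeWhile p := by
  induction l with
  | nil => simp
  | cons x xs ih =>
    by_cases h : p x <;> simp [h, ih]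

-- on a ≤-sorted list, an element is < n iff its index lies before the takeWhile boundary
theorem sorted_lt_iff (n : Int) (l : List Int) (hs : l.Pairwise (· ≤ ·)) :
    ∀ i (hi : i < l.length), (l[i] < n ↔ i < (l.takeWhile (fun x => decide (x < n))).length) := by
  induction l with
  | nil => intro i hi; simp at hi
  | cons x xs ih =>
    rcases List.pairwise_cons.mp hs with ⟨hx, hxs⟩
    intro i hi
    cases i with
    | zero =>
      by_cases h : x < n <;> simp [h]
    | succ j =>
      have hj : j < xs.length := by simpa using hi
      by_cases h : x < n
      · have := ih hxs j hj
        simpa [List.takeWhile_cons, h, Nat.succ_lt_succ_iff] using this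
      · have hle : x ≤ xs[j] := hx _ (List.getElem_mem hj)
        have : ¬ xs[j] < n := by omega
        simp [h, this]

theorem circPri_sorted : circPri.Pairwise (· ≤ ·) := by decide

-- binary-search invariant: if the takeWhile boundary lies in [lo, hi] ⊆ [0, length], bisectLeft finds it
theorem bisect_inv (n : Int) (lo hi : Nat)
    (h1 : lo ≤ (circPri.takeWhile (fun x => decide (x < n))).length)
    (h2 : (circPri.takeWhile (fun x => decide (x < n))).length ≤ hi)
    (h3 : hi ≤ circPri.length) :
    bisectLeft n lo hi = (circPri.takeWhile (fun x => decide (x < n))).length := by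
  rw [bisectLeft]
  by_cases h : lo < hi
  · have hmid : (lo + hi) / 2 < circPri.length := by omega
    have hgetD : circPri.getD ((lo + hi) / 2) 0 = circPri[(lo + hi) / 2] := by
      simp [hmid]
    have hchar := sorted_lt_iff n circPri circPri_sorted ((lo + hi) / 2) hmid
    simp only [h, dif_pos, hgetD]
    by_cases hc : circPri[(lo + hi) / 2] < n
    · have : (lo + hi) / 2 < (circPri.takeWhile (fun x => decide (x < n))).length :=
        hchar.mp hc
      rw [if_pos hc]
      exact bisect_inv n ((lo + hi) / 2 + 1) hi (by omega) h2 h3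
    · have : ¬ (lo + hi) / 2 < (circPri.takeWhile (fun x => decide (x < n))).length :=
        fun hlt => hc (hchar.mpr hlt)
      rw [if_neg hc]
      exact bisect_inv n lo ((lo + hi) / 2) h1 (by omega) (by omega)
  · simp only [h, dif_neg, not_false_iff]
    omega
termination_by hi - lo
decreasing_by all_goals omega

theorem solve_eq (n : Int) : Solve_Prob n = Solve_Prob_alt n := by
  have hlen : (circPri.takeWhile (fun x => decide (x < n))).length ≤ circPri.length :=
    (List.takeWhile_sublist _).length_le
  unfold Solve_Prob Solve_Prob_alt
  rw [bisect_inv n 0 circPri.length (Nat.zero_le _) hlen (le_refl _),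
      take_length_takeWhile, sumLoopA_eq]
  ring

-- ===== VERDICT (by name: the statement is the Claim_ definition above) =====
theorem Solve_Prob_spec : Claim_equal_Solve_Prob := by
  intro n _
  unfold Spec_Solve_Prob
  exact solve_eq n
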